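-- pv_equiv track=rewrite | github.com/irania9O/My-Django-Blog | extentions/utils.py | persian_number_conventor
-- ===== SOURCE A (Python) =====
-- def persian_number_conventor(input_str):
--     numbers = {
--         "0": "۰",
--         "1": "١",
--         "2": "۲",
--         "3": "۳",
--         "4": "۴",
--         "5": "۵",
--         "6": "۶",
--         "7": "۷",
--         "8": "۸",
--         "9": "۹",
--     }
--     for english_number, persian_number in numbers.items():
--         input_str = input_str.replace(english_number, persian_number)
--
--     return input_str
-- ===== SOURCE B (Python) =====
-- def persian_number_conventor(input_str):
--     return input_str.translate(str.maketrans("0123456789", "۰١۲۳۴۵۶۷۸۹"))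
-- ===== Notes on version B (the rewrite author's own statement) =====
-- stated objective: idiomatic
-- what changed: Replaces the ten whole-string str.replace scans with a single str.translate pass over a character translation table built once by str.maketrans.
import Mathlib
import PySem

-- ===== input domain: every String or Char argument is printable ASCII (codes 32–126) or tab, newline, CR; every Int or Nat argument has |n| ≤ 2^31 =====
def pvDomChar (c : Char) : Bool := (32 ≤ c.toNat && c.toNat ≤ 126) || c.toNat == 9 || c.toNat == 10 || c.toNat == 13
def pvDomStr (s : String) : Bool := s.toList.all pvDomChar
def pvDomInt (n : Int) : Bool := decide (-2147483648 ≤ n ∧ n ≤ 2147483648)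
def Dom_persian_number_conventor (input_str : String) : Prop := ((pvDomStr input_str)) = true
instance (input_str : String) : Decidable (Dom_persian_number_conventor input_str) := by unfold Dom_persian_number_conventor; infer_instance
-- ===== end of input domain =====

-- B replaces A's ten whole-string `replace` scans by one `str.translate` pass over a maketrans table; same result, idiomatic.

-- ===== PORT A =====
-- the literal `numbers` dict of A
def pnNumbers : PySem.Dict String String :=
  PySem.Dict.ofList
    [("0", "۰"), ("1", "١"), ("2", "۲"), ("3", "۳"), ("4", "۴"),
     ("5", "۵"), ("6", "۶"), ("7", "۷"), ("8", "۸"), ("9", "۹")]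

def persian_number_conventor (input_str : String) : String :=
  (PySem.Dict.items pnNumbers).foldl
    (fun s p => PySem.Str.replace s p.1 p.2) input_str

-- ===== PORT B =====
-- str.maketrans("0123456789", "۰١۲۳۴۵۶۷۸۹"): a character-to-character translation table
def pnTable : List (Char × Char) :=
  "0123456789".toList.zip "۰١۲۳۴۵۶۷۸۹".toList

-- str.translate: each character is looked up in the table, unmapped characters pass through
def persian_number_conventor_alt (input_str : String) : String :=
  String.ofList (input_str.toList.map (fun c =>
    match pnTable.find? (fun p => p.1 == c) with
    | some p => p.2
    | none => c))

-- ===== PRECONDITION & SPEC =====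
def Spec_persian_number_conventor (input_str : String) (out : String) : Prop := out = persian_number_conventor_alt input_str
instance (input_str : String) (out : String) : Decidable (Spec_persian_number_conventor input_str out) := by unfold Spec_persian_number_conventor; infer_instance

-- ===== CLAIM (what is proved, stated in full; the proofs are below) =====
def Claim_equal_persian_number_conventor : Prop := ∀ (input_str : String), Dom_persian_number_conventor input_str → Spec_persian_number_conventor input_str (persian_number_conventor input_str)

-- ===== LEMMAS AND PROOFS =====

-- substituting a single character: `replace` with a one-character pattern is a map
theorem replace_go_singleton (c p : Char) (l : List Char) : ∀ (fuel : Nat) (acc : List Char),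
    l.length ≤ fuel →
    PySem.Chars.replace.go [c] [p] fuel l acc
      = acc.reverse ++ l.map (fun x => if x = c then p else x) := by
  induction l with
  | nil =>
      intro fuel acc _
      cases fuel <;> simp [PySem.Chars.replace.go]
  | cons c' t ih =>
      intro fuel acc hle
      cases fuel with
      | zero => simp at hle
      | succ n =>
          by_cases h : c = c'
          · subst h
            simp only [PySem.Chars.replace.go, List.isPrefixOf, List.length_cons] at *
            simp only [BEq.refl, Bool.true_and, if_true, List.length_nil,
                       Nat.zero_add, List.drop_succ_cons, List.drop_zero]
            rw [ih n _ (by omega)]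
            simp
          · simp only [PySem.Chars.replace.go]
            have hpre : [c].isPrefixOf (c' :: t) = false := by
              simp [List.isPrefixOf]
              exact fun hc => h hc
            rw [hpre]
            simp only [Bool.false_eq_true, if_false]
            rw [ih n _ (by simpa using Nat.le_of_succ_le_succ hle)]
            simp [Ne.symm h]

theorem replace_singleton (c p : Char) (s : List Char) :
    PySem.Chars.replace s [c] [p] = s.map (fun x => if x = c then p else x) := by
  simp only [PySem.Chars.replace, List.isEmpty_cons, Bool.false_eq_true, if_false]
  simpa using replace_go_singleton c p s s.length [] (le_refl _)

-- the character translation performed by both programs, as one function on characters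
def pnTr (ch : Char) : Char :=
  if ch = '0' then '۰' else if ch = '1' then '١' else if ch = '2' then '۲' else
  if ch = '3' then '۳' else if ch = '4' then '۴' else if ch = '5' then '۵' else
  if ch = '6' then '۶' else if ch = '7' then '۷' else if ch = '8' then '۸' else
  if ch = '9' then '۹' else ch

theorem table_lookup (c : Char) :
    (match pnTable.find? (fun p => p.1 == c) with
     | some p => p.2
     | none => c) = pnTr c := by
  by_cases h0 : c = '0'; · subst h0; decide
  by_cases h1 : c = '1'; · subst h1; decide
  by_cases h2 : c = '2'; · subst h2; decide
  by_cases h3 : c = '3'; · subst h3; decide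
  by_cases h4 : c = '4'; · subst h4; decide
  by_cases h5 : c = '5'; · subst h5; decide
  by_cases h6 : c = '6'; · subst h6; decide
  by_cases h7 : c = '7'; · subst h7; decide
  by_cases h8 : c = '8'; · subst h8; decide
  by_cases h9 : c = '9'; · subst h9; decide
  have htab : pnTable =
      [('0','۰'),('1','١'),('2','۲'),('3','۳'),('4','۴'),
       ('5','۵'),('6','۶'),('7','۷'),('8','۸'),('9','۹')] := by decide
  rw [htab]
  have e : ∀ d : Char, c ≠ d → (d == c) = false := by
    intro d hd; simp [beq_eq_false_iff_ne]; exact fun he => hd he.symm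
  simp only [List.find?, e _ h0, e _ h1, e _ h2, e _ h3, e _ h4,
             e _ h5, e _ h6, e _ h7, e _ h8, e _ h9]
  simp [pnTr, h0, h1, h2, h3, h4, h5, h6, h7, h8, h9]

theorem alt_toList (s : String) :
    (persian_number_conventor_alt s).toList = s.toList.map pnTr := by
  simp only [persian_number_conventor_alt]
  rw [String.toList_ofList]
  exact List.map_congr_left (fun c _ => table_lookup c)

theorem a_toList (s : String) :
    (persian_number_conventor s).toList = s.toList.map pnTr := by
  simp only [persian_number_conventor]
  have hitems : PySem.Dict.items pnNumbers =
      [("0", "۰"), ("1", "١"), ("2", "۲"), ("3", "۳"), ("4", "۴"),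
       ("5", "۵"), ("6", "۶"), ("7", "۷"), ("8", "۸"), ("9", "۹")] := by decide
  rw [hitems]
  simp only [List.foldl_cons, List.foldl_nil]
  have hstep : ∀ (t : String) (old neu : String) (c p : Char),
      old.toList = [c] → neu.toList = [p] →
      (PySem.Str.replace t old neu).toList
        = t.toList.map (fun x => if x = c then p else x) := by
    intro t old neu c p ho hn
    rw [PySem.Str.toList_replace, ho, hn]
    exact replace_singleton c p t.toList
  rw [hstep _ "9" "۹" '9' '۹' (by decide) (by decide),
      hstep _ "8" "۸" '8' '۸' (by decide) (by decide),
      hstep _ "7" "۷" '7' '۷' (by decide) (by decide),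
      hstep _ "6" "۶" '6' '۶' (by decide) (by decide),
      hstep _ "5" "۵" '5' '۵' (by decide) (by decide),
      hstep _ "4" "۴" '4' '۴' (by decide) (by decide),
      hstep _ "3" "۳" '3' '۳' (by decide) (by decide),
      hstep _ "2" "۲" '2' '۲' (by decide) (by decide),
      hstep _ "1" "١" '1' '١' (by decide) (by decide),
      hstep _ "0" "۰" '0' '۰' (by decide) (by decide)]
  simp only [List.map_map]
  apply List.map_congr_left
  intro x _
  by_cases h0 : x = '0'; · subst h0; decide
  by_cases h1 : x = '1'; · subst h1; decide
  by_cases h2 : x = '2'; · subst h2; decide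
  by_cases h3 : x = '3'; · subst h3; decide
  by_cases h4 : x = '4'; · subst h4; decide
  by_cases h5 : x = '5'; · subst h5; decide
  by_cases h6 : x = '6'; · subst h6; decide
  by_cases h7 : x = '7'; · subst h7; decide
  by_cases h8 : x = '8'; · subst h8; decide
  by_cases h9 : x = '9'; · subst h9; decide
  simp [Function.comp, pnTr, h0, h1, h2, h3, h4, h5, h6, h7, h8, h9]

-- ===== VERDICT (by name: the statement is the Claim_ definition above) =====
theorem persian_number_conventor_spec : Claim_equal_persian_number_conventor := by
  intro s _
  unfold Spec_persian_number_conventor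
  have h1 := a_toList s
  rw [← alt_toList s] at h1
  exact String.toList_inj.mp h1
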